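-- pv_equiv track=rewrite | github.com/RoopkumarD/aoc-2023 | day11/utils.py | manhattan_dist_with_expand
-- ===== SOURCE A (Python) =====
-- from typing import List
--
-- def manhattan_dist_with_expand(
--     inital: tuple[int, int],
--     goal: tuple[int, int],
--     expand_x: List[int],
--     expand_y: List[int],
--     expand: int,
-- ):
--     x = abs(goal[0] - inital[0])
--     if goal[0] > inital[0]:
--         x_range = range(inital[0], goal[0])
--     else:
--         x_range = range(goal[0], inital[0])
--
--     for i in expand_x:
--         if i in x_range:
--             x += expand
--
--     y = abs(goal[1] - inital[1])
--     if goal[1] > inital[1]: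
--         y_range = range(inital[1], goal[1])
--     else:
--         y_range = range(goal[1], inital[1])
--
--     for j in expand_y:
--         if j in y_range:
--             y += expand
--
--     return x + y
-- ===== SOURCE B (Python) =====
-- def manhattan_dist_with_expand(
--     inital,
--     goal,
--     expand_x,
--     expand_y,
--     expand,
-- ):
--     # sort each expansion list once, then count entries inside the interval
--     # with two binary searches instead of scanning the whole list per axis
--     def bisect_left(s, v):
--         lo, hi = 0, len(s)
--         while lo < hi:
--             mid = (lo + hi) // 2
--             if s[mid] < v:
--                 lo = mid + 1
--             else:
--                 hi = mid
--         return lo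
--
--     def axis(a, b, entries):
--         lo, hi = (a, b) if a <= b else (b, a)
--         s = sorted(entries)
--         return (hi - lo) + expand * (bisect_left(s, hi) - bisect_left(s, lo))
--
--     return axis(inital[0], goal[0], expand_x) + axis(inital[1], goal[1], expand_y)
-- ===== Notes on version B (the rewrite author's own statement) =====
-- stated objective: alternative
-- what changed: Replaces the per-element interval-membership scan of each expansion list with sort-once plus two binary searches (bisect_left) that count entries inside the interval, and computes |hi-lo| arithmetically.
import Mathlib
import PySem

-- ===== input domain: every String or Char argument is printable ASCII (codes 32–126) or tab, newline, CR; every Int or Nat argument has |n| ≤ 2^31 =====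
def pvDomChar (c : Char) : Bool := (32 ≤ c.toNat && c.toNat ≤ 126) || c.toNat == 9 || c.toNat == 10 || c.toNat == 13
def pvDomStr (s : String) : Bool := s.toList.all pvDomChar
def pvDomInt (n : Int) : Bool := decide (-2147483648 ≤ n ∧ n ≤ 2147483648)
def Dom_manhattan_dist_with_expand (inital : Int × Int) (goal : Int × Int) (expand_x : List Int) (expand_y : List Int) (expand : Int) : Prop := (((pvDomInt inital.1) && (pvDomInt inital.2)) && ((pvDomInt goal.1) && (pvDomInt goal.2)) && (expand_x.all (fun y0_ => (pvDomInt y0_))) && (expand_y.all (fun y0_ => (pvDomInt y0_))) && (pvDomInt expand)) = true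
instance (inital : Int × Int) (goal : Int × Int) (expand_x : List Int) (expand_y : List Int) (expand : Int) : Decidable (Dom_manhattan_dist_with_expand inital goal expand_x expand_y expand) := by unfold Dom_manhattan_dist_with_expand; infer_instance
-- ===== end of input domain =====

-- B replaces A's per-element interval scan with sort-once + two binary searches; objective: alternative algorithm.

-- ===== PORT A =====
def manhattan_dist_with_expand (inital : Int × Int) (goal : Int × Int) (expand_x : List Int) (expand_y : List Int) (expand : Int) : Int :=
  let x0 := |goal.1 - inital.1|
  -- `i in range(a, b)` (step 1) is exactly a ≤ i ∧ i < b
  let xr : Int × Int := if goal.1 > inital.1 then (inital.1, goal.1) else (goal.1, inital.1)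
  let x := expand_x.foldl (fun acc i => if xr.1 ≤ i ∧ i < xr.2 then acc + expand else acc) x0
  let y0 := |goal.2 - inital.2|
  let yr : Int × Int := if goal.2 > inital.2 then (inital.2, goal.2) else (goal.2, inital.2)
  let y := expand_y.foldl (fun acc j => if yr.1 ≤ j ∧ j < yr.2 then acc + expand else acc) y0
  x + y

-- ===== PORT B =====
-- Source B's hand-written bisect_left is exactly PySem.List.bisectLeft (same lo/hi/mid loop)
def pvAxisAlt (a b : Int) (entries : List Int) (expand : Int) : Int :=
  let lo := if a ≤ b then a else b
  let hi := if a ≤ b then b else a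
  let s := PySem.List.sorted entries (fun v => v)
  (hi - lo) + expand * ((PySem.List.bisectLeft s hi : Int) - (PySem.List.bisectLeft s lo : Int))

def manhattan_dist_with_expand_alt (inital : Int × Int) (goal : Int × Int) (expand_x : List Int) (expand_y : List Int) (expand : Int) : Int :=
  pvAxisAlt inital.1 goal.1 expand_x expand + pvAxisAlt inital.2 goal.2 expand_y expand

-- ===== PRECONDITION & SPEC =====
def Spec_manhattan_dist_with_expand (inital : Int × Int) (goal : Int × Int) (expand_x : List Int) (expand_y : List Int) (expand : Int) (out : Int) : Prop := out = manhattan_dist_with_expand_alt inital goal expand_x expand_y expand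
instance (inital : Int × Int) (goal : Int × Int) (expand_x : List Int) (expand_y : List Int) (expand : Int) (out : Int) : Decidable (Spec_manhattan_dist_with_expand inital goal expand_x expand_y expand out) := by unfold Spec_manhattan_dist_with_expand; infer_instance

-- ===== CLAIM (what is proved, stated in full; the proofs are below) =====
def Claim_equal_manhattan_dist_with_expand : Prop := ∀ (inital : Int × Int) (goal : Int × Int) (expand_x : List Int) (expand_y : List Int) (expand : Int), Dom_manhattan_dist_with_expand inital goal expand_x expand_y expand → Spec_manhattan_dist_with_expand inital goal expand_x expand_y expand (manhattan_dist_with_expand inital goal expand_x expand_y expand)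

-- ===== LEMMAS AND PROOFS =====

-- A's loop adds `e` once per element inside the interval
theorem pv_foldl_count (lo hi e : Int) :
    ∀ (l : List Int) (c : Int),
      l.foldl (fun acc i => if lo ≤ i ∧ i < hi then acc + e else acc) c
        = c + e * (l.countP (fun i => decide (lo ≤ i ∧ i < hi)) : Int) := by
  intro l
  induction l with
  | nil => intro c; simp
  | cons a t ih =>
      intro c
      simp only [List.foldl_cons, List.countP_cons, ih]
      by_cases h : lo ≤ a ∧ a < hi
      · simp [h]; push_cast; ring
      · simp [h]

-- counting below hi splits at lo when lo ≤ hi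
theorem pv_count_split (lo hi : Int) (h : lo ≤ hi) :
    ∀ (l : List Int),
      l.countP (fun i => decide (i < hi))
        = l.countP (fun i => decide (i < lo)) + l.countP (fun i => decide (lo ≤ i ∧ i < hi)) := by
  intro l
  induction l with
  | nil => simp
  | cons a t ih =>
      by_cases h1 : a < lo
      · have h3 : a < hi := by omega
        have h2 : ¬ (lo ≤ a ∧ a < hi) := by omega
        simp [List.countP_cons, ih, h1, h2, h3]; omega
      · by_cases h3 : a < hi
        · have h2 : lo ≤ a ∧ a < hi := by omega
          simp [List.countP_cons, ih, h1, h2, h3]; omega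
        · have h2 : ¬ (lo ≤ a ∧ a < hi) := by omega
          simp [List.countP_cons, ih, h1, h2, h3]
  
-- a position r whose left part is all < v and right part all ≥ v is countP (· < v)
theorem pv_count_index (v : Int) :
    ∀ (s : List Int) (r : Nat), r ≤ s.length →
      (∀ j (hj : j < s.length), j < r → s[j] < v) →
      (∀ j (hj : j < s.length), r ≤ j → v ≤ s[j]) →
      s.countP (fun i => decide (i < v)) = r := by
  intro s
  induction s with
  | nil => intro r hr _ _; simpa using (Nat.le_zero.mp hr).symm
  | cons a t ih =>
      intro r hr h1 h2
      cases r with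
      | zero =>
          have ha : v ≤ a := h2 0 (by simp) (Nat.zero_le _)
          have ht : t.countP (fun i => decide (i < v)) = 0 := by
            apply ih 0 (Nat.zero_le _)
            · intro j hj hj0; omega
            · intro j hj _
              have := h2 (j + 1) (by simpa using Nat.succ_lt_succ hj) (Nat.zero_le _)
              simpa using this
          simp [List.countP_cons, ht, not_lt.mpr ha]
      | succ r' =>
          have ha : a < v := h1 0 (by simp) (Nat.succ_pos _)
          have ht : t.countP (fun i => decide (i < v)) = r' := by
            apply ih r' (by simpa using hr)
            · intro j hj hjr
              have := h1 (j + 1) (by simpa using Nat.succ_lt_succ hj) (by omega)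
              simpa using this
            · intro j hj hjr
              have := h2 (j + 1) (by simpa using Nat.succ_lt_succ hj) (by omega)
              simpa using this
          simp [List.countP_cons, ht, ha]

-- bisectLeft on a sorted list counts the elements < v
theorem pv_bisect_count (s : List Int) (hs : s.Pairwise (· ≤ ·)) (v : Int) :
    PySem.List.bisectLeft s v = s.countP (fun i => decide (i < v)) := by
  obtain ⟨hle, hlt, hge⟩ := PySem.List.bisectLeft_spec s v hs
  exact (pv_count_index v s _ hle hlt hge).symm

-- one axis of A equals one axis of B
theorem pv_axis (a b e : Int) (entries : List Int) :
    (let r : Int × Int := if b > a then (a, b) else (b, a)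
     entries.foldl (fun acc i => if r.1 ≤ i ∧ i < r.2 then acc + e else acc) |b - a|)
      = pvAxisAlt a b entries e := by
  have hperm := PySem.List.sorted_perm entries (fun v => v) false
  have hpw : (PySem.List.sorted entries (fun v => v)).Pairwise (· ≤ ·) :=
    PySem.List.sorted_pairwise entries (fun v => v)
  set s := PySem.List.sorted entries (fun v => v) with hsdef
  have key : ∀ lo hi : Int, lo ≤ hi →
      ((PySem.List.bisectLeft s hi : Int) - (PySem.List.bisectLeft s lo : Int))
        = (entries.countP (fun i => decide (lo ≤ i ∧ i < hi)) : Int) := by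
    intro lo hi hlohi
    rw [pv_bisect_count s hpw hi, pv_bisect_count s hpw lo,
        hperm.countP_eq, hperm.countP_eq, pv_count_split lo hi hlohi entries]
    push_cast; ring
  by_cases hab : a ≤ b
  · have habs : |b - a| = b - a := abs_of_nonneg (by omega)
    by_cases hlt : b > a
    · simp only [hlt, if_pos, pvAxisAlt, if_pos hab, habs,
        pv_foldl_count a b e entries]
      rw [← hsdef]
      linear_combination (-e) * key a b (le_of_lt hlt)
    · have hba : b = a := by omega
      subst hba
      simp only [gt_iff_lt, lt_irrefl, if_false, pvAxisAlt, if_pos (le_refl b), habs,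
        pv_foldl_count b b e entries]
      rw [← hsdef]
      linear_combination (-e) * key b b (le_refl b)
  · have hlt : ¬ b > a := by omega
    have habs : |b - a| = a - b := by rw [abs_of_neg (by omega)]; ring
    simp only [hlt, if_false, pvAxisAlt, if_neg hab, habs,
      pv_foldl_count b a e entries]
    rw [← hsdef]
    linear_combination (-e) * key b a (by omega)

-- ===== VERDICT (by name: the statement is the Claim_ definition above) =====
theorem manhattan_dist_with_expand_spec : Claim_equal_manhattan_dist_with_expand := by
  intro inital goal expand_x expand_y expand _
  show _ = _
  unfold manhattan_dist_with_expand manhattan_dist_with_expand_alt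
  have hx := pv_axis inital.1 goal.1 expand expand_x
  have hy := pv_axis inital.2 goal.2 expand expand_y
  simp only at hx hy
  dsimp only
  rw [hx, hy]
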